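-- pv_equiv track=rewrite | github.com/zachlai23/academic-assistant | backend/utils/parse_degreeworks.py | parse_still_needed_lines
-- ===== SOURCE A (Python) =====
-- def parse_still_needed_lines(text):
--     still_needed = []
--
--     lines = text.split('\n')
--
--     i = 0
--     while i < len(lines):
--         line = lines[i]
--
--         if 'Still needed:' in line:
--             full_text = line
--             i += 1
--
--             # Capture continuation lines
--             while i < len(lines):
--                 next_line = lines[i].strip()
--
--                 # Stop if empty or new section
--                 if not next_line or 'Still needed:' in next_line:
--                     break
--
--                 # if line has 'or', still part of current line
--                 if next_line.startswith('or ') or ' or ' in next_line: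
--                     full_text += ' ' + next_line
--                     i += 1
--                 else:
--                     break
--
--             still_needed.append(full_text)
--         else:
--             i += 1
--     return still_needed
-- ===== SOURCE B (Python) =====
-- def parse_still_needed_lines(text):
--     result = []
--     current = None
--     for line in text.split('\n'):
--         if current is not None:
--             s = line.strip()
--             if s and 'Still needed:' not in s and (s.startswith('or ') or ' or ' in s):
--                 current += ' ' + s
--                 continue
--             result.append(current)
--             current = None
--         if 'Still needed:' in line:
--             current = line
--     if current is not None:
--         result.append(current)
--     return result
-- ===== Notes on version B (the rewrite author's own statement) =====
-- stated objective: simpler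
-- what changed: Replaced the nested while loops with a manual index by one flat for-loop over the lines that maintains a single optional `current` block, flushed on block boundaries and at the end.
import Mathlib
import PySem

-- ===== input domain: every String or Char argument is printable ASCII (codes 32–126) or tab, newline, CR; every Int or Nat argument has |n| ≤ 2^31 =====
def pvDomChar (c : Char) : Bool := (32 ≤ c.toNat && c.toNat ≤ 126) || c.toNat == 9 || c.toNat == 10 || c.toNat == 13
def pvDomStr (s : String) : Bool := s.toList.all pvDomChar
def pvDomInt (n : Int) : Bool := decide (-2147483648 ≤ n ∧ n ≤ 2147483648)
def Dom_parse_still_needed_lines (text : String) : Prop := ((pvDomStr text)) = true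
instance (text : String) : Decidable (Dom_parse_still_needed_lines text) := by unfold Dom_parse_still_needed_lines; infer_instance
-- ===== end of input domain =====

-- B replaces A's nested while loops over a manual index by one flat pass that
-- maintains a single optional current block (objective: simpler).

-- ===== PORT A =====
-- inner while loop of A: consumes continuation lines, returns (full_text, remaining lines)
def pvInnerA (lines : List String) (full : String) : String × List String :=
  match lines with
  | [] => (full, [])
  | l :: rest =>
    let next := PySem.Str.strip l
    if next = "" ∨ PySem.Str.isIn "Still needed:" next = true then (full, l :: rest)
    else if PySem.Str.startswith next "or " = true ∨ PySem.Str.isIn " or " next = true then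
      pvInnerA rest (full ++ " " ++ next)
    else (full, l :: rest)

-- termination fact for the outer loop (cited in decreasing_by)
theorem pvInnerA_snd_length (lines : List String) (full : String) :
    (pvInnerA lines full).2.length ≤ lines.length := by
  induction lines generalizing full with
  | nil => simp [pvInnerA]
  | cons l rest ih =>
    simp only [pvInnerA]
    split
    · simp
    · split
      · exact le_trans (ih _) (by simp)
      · simp

-- outer while loop of A
def pvOuterA (lines : List String) : List String :=
  match lines with
  | [] => []
  | l :: rest =>
    if PySem.Str.isIn "Still needed:" l then
      let p := pvInnerA rest l
      p.1 :: pvOuterA p.2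
    else pvOuterA rest
termination_by lines.length
decreasing_by
  · have := pvInnerA_snd_length rest l; simp; omega
  · simp

def parse_still_needed_lines (text : String) : List String :=
  pvOuterA ((PySem.Str.split? text "\n").getD [])  -- split? is always `some` for the nonempty separator "\n"

-- ===== PORT B =====
-- one step of B's flat loop; state = (result so far, optional current block)
def pvStepB (st : List String × Option String) (line : String) : List String × Option String :=
  match st.2 with
  | some c =>
    let s := PySem.Str.strip line
    if s ≠ "" ∧ ¬ PySem.Str.isIn "Still needed:" s = true
        ∧ (PySem.Str.startswith s "or " = true ∨ PySem.Str.isIn " or " s = true) then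
      (st.1, some (c ++ " " ++ s))
    else if PySem.Str.isIn "Still needed:" line then (st.1 ++ [c], some line)
    else (st.1 ++ [c], none)
  | none => if PySem.Str.isIn "Still needed:" line then (st.1, some line) else st

-- final flush of B
def pvFlushB (st : List String × Option String) : List String :=
  match st.2 with
  | some c => st.1 ++ [c]
  | none => st.1

def parse_still_needed_lines_alt (text : String) : List String :=
  pvFlushB (((PySem.Str.split? text "\n").getD []).foldl pvStepB ([], none))

-- ===== PRECONDITION & SPEC =====
def Spec_parse_still_needed_lines (text : String) (out : List String) : Prop := out = parse_still_needed_lines_alt text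
instance (text : String) (out : List String) : Decidable (Spec_parse_still_needed_lines text out) := by unfold Spec_parse_still_needed_lines; infer_instance

-- ===== CLAIM (what is proved, stated in full; the proofs are below) =====
def Claim_equal_parse_still_needed_lines : Prop := ∀ (text : String), Dom_parse_still_needed_lines text → Spec_parse_still_needed_lines text (parse_still_needed_lines text)

-- ===== LEMMAS AND PROOFS =====

-- A's result when a block `c` is currently open ('cur = some c') resp. closed
def pvOA (cur : Option String) (lines : List String) : List String :=
  match cur with
  | none => pvOuterA lines
  | some c => (pvInnerA lines c).1 :: pvOuterA (pvInnerA lines c).2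

theorem pvMain (lines : List String) (acc : List String) (cur : Option String) :
    pvFlushB (lines.foldl pvStepB (acc, cur)) = acc ++ pvOA cur lines := by
  induction lines generalizing acc cur with
  | nil => cases cur <;> simp [pvFlushB, pvOA, pvInnerA, pvOuterA]
  | cons l rest ih =>
    rw [List.foldl_cons]
    cases cur with
    | none =>
      by_cases hN : PySem.Str.isIn "Still needed:" l = true
      · rw [show pvStepB (acc, none) l = (acc, some l) by
            simp only [pvStepB]; rw [if_pos hN], ih]
        simp only [pvOA]
        rw [pvOuterA, if_pos hN]
      · rw [show pvStepB (acc, none) l = (acc, none) by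
            simp only [pvStepB]; rw [if_neg hN], ih]
        simp only [pvOA]
        rw [pvOuterA, if_neg hN]
    | some c =>
      by_cases hc : PySem.Str.strip l ≠ "" ∧ ¬ PySem.Str.isIn "Still needed:" (PySem.Str.strip l) = true
          ∧ (PySem.Str.startswith (PySem.Str.strip l) "or " = true ∨ PySem.Str.isIn " or " (PySem.Str.strip l) = true)
      · -- continuation line: both sides extend the current block with the stripped line
        obtain ⟨h1, h2, h3⟩ := hc
        have hrec : pvInnerA (l :: rest) c = pvInnerA rest (c ++ " " ++ PySem.Str.strip l) := by
          rw [pvInnerA]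
          rw [if_neg (not_or.mpr ⟨h1, h2⟩), if_pos h3]
        rw [show pvStepB (acc, some c) l = (acc, some (c ++ " " ++ PySem.Str.strip l)) by
            simp only [pvStepB]; rw [if_pos ⟨h1, h2, h3⟩], ih]
        simp only [pvOA, hrec]
      · -- inner loop stops at l: pvInnerA (l :: rest) c = (c, l :: rest)
        have hstop : pvInnerA (l :: rest) c = (c, l :: rest) := by
          rw [pvInnerA]
          by_cases h1 : PySem.Str.strip l = "" ∨ PySem.Str.isIn "Still needed:" (PySem.Str.strip l) = true
          · rw [if_pos h1]
          · push Not at h1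
            rw [if_neg (not_or.mpr ⟨h1.1, h1.2⟩),
                if_neg (fun h3 => hc ⟨h1.1, h1.2, h3⟩)]
        by_cases hN : PySem.Str.isIn "Still needed:" l = true
        · rw [show pvStepB (acc, some c) l = (acc ++ [c], some l) by
              simp only [pvStepB]; rw [if_neg hc, if_pos hN], ih]
          simp only [pvOA, hstop]
          rw [pvOuterA, if_pos hN]
          simp
        · rw [show pvStepB (acc, some c) l = (acc ++ [c], none) by
              simp only [pvStepB]; rw [if_neg hc, if_neg hN], ih]
          simp only [pvOA, hstop]
          rw [pvOuterA, if_neg hN]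
          simp

-- ===== VERDICT (by name: the statement is the Claim_ definition above) =====
theorem parse_still_needed_lines_spec : Claim_equal_parse_still_needed_lines := by
  intro text _
  unfold Spec_parse_still_needed_lines parse_still_needed_lines parse_still_needed_lines_alt
  rw [pvMain]
  simp only [pvOA, List.nil_append]
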